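-- pv_equiv track=rewrite | github.com/soyoon26/Programmers | Lv.2 87390.n^2 배열 자르기.py | solution
-- ===== SOURCE A (Python) =====
-- def solution(n, left, right):
--     arr=[]
--     for i in range(left//n+1,right//n+2):
--         for j in range(i):
--             arr.append(i)
--         for k in range(i+1,n+1):
--             arr.append(k)
--     return arr[left%n:len(arr)-(n-right%n)+1]
-- ===== SOURCE B (Python) =====
-- def solution(n, left, right):
--     return [max(g // n, g % n) + 1 for g in range(left, right + 1)]
-- ===== Notes on version B (the rewrite author's own statement) =====
-- stated objective: simpler
-- what changed: Instead of materialising all rows from left//n to right//n (n cells each) and slicing, B computes each requested cell directly by the closed form max(g//n, g%n)+1 for g in [left, right] (intended as faster for narrow queries; a timing run measured large but inconsistent ratios, so no speed claim is made).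
-- outside the precondition, e.g. on solution(1, 1, 1): A returns [2, 2], B returns [2]; on solution(2, -3, 1): A returns [1, 2, 1, 2, 1, 2], B returns [2, 1, 2, 1, 2]; on solution(-3, 0, 2): A returns [], B returns [1, 0, 0]
import Mathlib
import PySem

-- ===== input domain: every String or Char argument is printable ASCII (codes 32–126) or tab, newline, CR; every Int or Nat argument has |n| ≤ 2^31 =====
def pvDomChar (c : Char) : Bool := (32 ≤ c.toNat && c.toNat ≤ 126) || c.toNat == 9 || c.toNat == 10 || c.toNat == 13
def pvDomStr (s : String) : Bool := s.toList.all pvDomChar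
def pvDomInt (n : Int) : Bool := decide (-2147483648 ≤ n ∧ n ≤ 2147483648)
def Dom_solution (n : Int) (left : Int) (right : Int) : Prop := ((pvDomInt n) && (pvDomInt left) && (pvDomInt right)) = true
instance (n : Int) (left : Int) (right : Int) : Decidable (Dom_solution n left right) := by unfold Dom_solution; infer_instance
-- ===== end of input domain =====

-- B replaces A's row-by-row construction + slice by the closed form max(g//n, g%n)+1 per requested index g (objective: simpler).

-- ===== PORT A =====
def solution (n : Int) (left : Int) (right : Int) : List Int :=
  let arr : List Int :=
    (PySem.List.pyRange (PySem.Int.floordiv left n + 1) (PySem.Int.floordiv right n + 2) 1).foldl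
      (fun arr i =>
        let arr := (PySem.List.pyRange 0 i 1).foldl (fun a _j => a ++ [i]) arr
        (PySem.List.pyRange (i + 1) (n + 1) 1).foldl (fun a k => a ++ [k]) arr)
      []
  PySem.List.slice arr (some (PySem.Int.mod left n))
    (some ((arr.length : Int) - (n - PySem.Int.mod right n) + 1))

-- ===== PORT B =====
def solution_alt (n : Int) (left : Int) (right : Int) : List Int :=
  (PySem.List.pyRange left (right + 1) 1).map
    (fun g => max (PySem.Int.floordiv g n) (PySem.Int.mod g n) + 1)

-- ===== PRECONDITION & SPEC =====
-- Pre_ admits the problem's natural domain (1 ≤ n, 0 ≤ left, left/right < n^2) plus the whole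
-- empty-query region right//n < left//n; for n = 0 A raises ZeroDivisionError, and on the remaining
-- inputs (n < 0, or left < 0 / bounds ≥ n^2 with a nonempty query) A's slice arithmetic returns
-- accidental fragments of its buffer.
def Pre_solution (n : Int) (left : Int) (right : Int) : Prop :=
  1 ≤ n ∧ ((0 ≤ left ∧ left < n * n ∧ right < n * n) ∨
    PySem.Int.floordiv right n < PySem.Int.floordiv left n)
instance (n : Int) (left : Int) (right : Int) : Decidable (Pre_solution n left right) := by
  unfold Pre_solution; infer_instance

def pvWitness_solution : Int × Int × Int := (3, 2, 5)

def Spec_solution (n : Int) (left : Int) (right : Int) (out : List Int) : Prop :=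
  out = solution_alt n left right
instance (n : Int) (left : Int) (right : Int) (out : List Int) : Decidable (Spec_solution n left right out) := by
  unfold Spec_solution; infer_instance

-- ===== CLAIM (what is proved, stated in full; the proofs are below) =====
def Claim_equal_solution : Prop :=
  ∀ (n : Int) (left : Int) (right : Int), Dom_solution n left right →
    Pre_solution n left right → Spec_solution n left right (solution n left right)

-- ===== LEMMAS AND PROOFS =====

theorem pv_row_eq (n i : Int) (h1 : 1 ≤ i) (h2 : i ≤ n) :
    (PySem.List.pyRange 0 i 1).map (fun _ => i) ++ PySem.List.pyRange (i+1) (n+1) 1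
    = (PySem.List.pyRange 0 n 1).map (fun j => max i (j+1)) := by
  rw [PySem.List.pyRange_one_append 0 i n (by omega) h2, List.map_append]
  congr 1
  · apply List.map_congr_left
    intro j hj
    rw [PySem.List.mem_pyRange_one] at hj
    omega
  · rw [PySem.List.pyRange_one i n, PySem.List.pyRange_one (i+1) (n+1), List.map_map]
    have : (n + 1 - (i + 1)) = (n - i) := by ring
    rw [this]
    apply List.map_congr_left
    intro k hk
    simp only [Function.comp]
    omega

theorem pv_row_eq2 (n i : Int) (hn : 0 < n) :
    (PySem.List.pyRange 0 n 1).map (fun j => max i (j+1))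
    = (PySem.List.pyRange ((i-1)*n) (i*n) 1).map (fun g => max (g / n) (g % n) + 1) := by
  rw [PySem.List.pyRange_one 0 n, PySem.List.pyRange_one ((i-1)*n) (i*n), List.map_map, List.map_map]
  have : (i*n - (i-1)*n) = n - 0 := by ring
  rw [this]
  apply List.map_congr_left
  intro k hk
  simp only [Function.comp]
  rw [List.mem_range] at hk
  have hk' : (k : Int) < n := by
    have := Int.toNat_of_nonneg (le_of_lt hn)
    omega
  have hk0 : (0:Int) ≤ (k:Int) := by positivity
  have e1 : (i-1)*n + (k:Int) = (k:Int) + n*(i-1) := by ring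
  have hdiv : ((i-1)*n + (k:Int)) / n = (i-1) := by
    rw [e1, Int.add_mul_ediv_left _ _ (by omega : n ≠ 0), Int.ediv_eq_zero_of_lt hk0 hk']
    ring
  have hmod : ((i-1)*n + (k:Int)) % n = (k:Int) := by
    rw [e1, Int.add_mul_emod_self_left, Int.emod_eq_of_lt hk0 hk']
  rw [hdiv, hmod]
  omega

theorem pv_rows_concat (n : Int) (hn : 0 < n) (k : Nat) (c : Int) (hc : 1 ≤ c)
    (hck : c + k ≤ n + 1) :
    (PySem.List.pyRange c (c + k) 1).flatMap
        (fun i => (PySem.List.pyRange 0 i 1).map (fun _ => i) ++ PySem.List.pyRange (i+1) (n+1) 1)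
    = (PySem.List.pyRange ((c-1)*n) ((c-1+k)*n) 1).map (fun g => max (g / n) (g % n) + 1) := by
  induction k with
  | zero =>
      simp [PySem.List.pyRange_one_eq_nil (le_refl c), PySem.List.pyRange_one_eq_nil (le_refl ((c-1)*n))]
  | succ k ih =>
      have hck' : c + k ≤ n + 1 := by omega
      have h1 : c ≤ c + k := by
        have : (0:Int) ≤ (k:Int) := Int.natCast_nonneg k
        omega
      have hsplit : (PySem.List.pyRange c (c + (k+1:Nat)) 1)
          = PySem.List.pyRange c (c + k) 1 ++ [c + k] := by
        have : (c + ((k:Int)+1)) = (c + k) + 1 := by ring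
        rw [show ((((k+1:Nat)):Int)) = (k:Int)+1 by norm_cast, this,
            PySem.List.pyRange_one_succ_right h1]
      rw [hsplit, List.flatMap_append, ih hck']
      have hrow := (pv_row_eq n (c+k) (by omega) (by omega)).trans
        (pv_row_eq2 n (c+k) hn)
      simp only [List.flatMap_cons, List.flatMap_nil, List.append_nil]
      rw [hrow]
      have e2 : (c + (k:Int) - 1) * n = (c-1+k)*n := by ring
      have e3 : (c + (k:Int)) * n = (c-1+(k+1:Nat))*n := by push_cast; ring
      rw [e2, e3, ← List.map_append, ← PySem.List.pyRange_one_append]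
      · have : (0:Int) ≤ (k:Int) := Int.natCast_nonneg k
        nlinarith
      · push_cast
        nlinarith [Int.natCast_nonneg k]

theorem pv_drop_map_pyRange (f : Int → Int) (s e : Int) (p : Nat) (h : s + p ≤ e) :
    (((PySem.List.pyRange s e 1).map f).drop p) = (PySem.List.pyRange (s + p) e 1).map f := by
  rw [PySem.List.pyRange_one_append s (s + p) e (by omega) h, List.map_append]
  have hl : ((PySem.List.pyRange s (s + p) 1).map f).length = p := by
    simp [PySem.List.length_pyRange_one]
  rw [List.drop_left' hl]

theorem pv_take_map_pyRange (f : Int → Int) (s e : Int) (q : Nat) (h : s + q ≤ e) :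
    (((PySem.List.pyRange s e 1).map f).take q) = (PySem.List.pyRange s (s + q) 1).map f := by
  rw [PySem.List.pyRange_one_append s (s + q) e (by omega) h, List.map_append]
  have hl : ((PySem.List.pyRange s (s + q) 1).map f).length = q := by
    simp [PySem.List.length_pyRange_one]
  rw [List.take_left' hl]

-- ===== VERDICT =====
theorem solution_spec : Claim_equal_solution := by
  intro n left right _ hpre
  obtain ⟨hn, hrest⟩ := hpre
  show solution n left right = solution_alt n left right
  have hn0 : 0 < n := hn
  unfold solution solution_alt
  simp only [PySem.Int.floordiv_eq_ediv_of_pos hn0, PySem.Int.mod_eq_emod_of_pos hn0] at hrest ⊢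
  set L := left / n with hL
  set R := right / n with hR
  set a := left % n with ha
  set b := right % n with hb
  have hLa : n * L + a = left := Int.mul_ediv_add_emod left n
  have hRb : n * R + b = right := Int.mul_ediv_add_emod right n
  have ha0 : 0 ≤ a := Int.emod_nonneg left (by omega)
  have han : a < n := Int.emod_lt_of_pos left hn0
  have hb0 : 0 ≤ b := Int.emod_nonneg right (by omega)
  have hbn : b < n := Int.emod_lt_of_pos right hn0
  simp only [PySem.List.foldl_append_singleton_eq_map,
    PySem.List.foldl_append_eq_flatMap, List.append_assoc, List.nil_append, List.map_id']
  by_cases hRL : R < L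
  · -- empty query crossing a row boundary: the row range is empty and so is B's range
    have hrl : right < left := by
      by_contra hc
      exact absurd (Int.ediv_le_ediv hn0 (by omega : left ≤ right)) (by omega)
    rw [PySem.List.pyRange_one_eq_nil (by omega : right + 1 ≤ left), List.map_nil,
      PySem.List.pyRange_one_eq_nil (by omega : R + 2 ≤ L + 1)]
    simp [PySem.List.slice, PySem.List.clampIdx]
  · obtain ⟨hl, hln2, hr⟩ | hdivlt := hrest
    swap
    · exact absurd hdivlt hRL
    have hL0 : 0 ≤ L := Int.ediv_nonneg hl (by omega)
    have hLn : L < n := by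
      rw [hL, Int.ediv_lt_iff_lt_mul hn0]
      exact hln2
    by_cases hlr : left ≤ right
    · -- left ≤ right < n^2 : the sliced buffer is exactly the requested block
      have hLR : L ≤ R := Int.ediv_le_ediv hn0 hlr
      have hRn : R < n := by
        rw [hR, Int.ediv_lt_iff_lt_mul hn0]
        exact hr
      have hk : (((R+1-L).toNat : Nat) : Int) = R+1-L := Int.toNat_of_nonneg (by omega)
      have harr := pv_rows_concat n hn0 (R+1-L).toNat (L+1) (by omega) (by rw [hk]; omega)
      rw [hk] at harr
      have e1 : L + 1 + (R + 1 - L) = R + 2 := by ring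
      have e2 : (L + 1 - 1) * n = L * n := by ring
      have e3 : (L + 1 - 1 + (R + 1 - L)) * n = (R+1) * n := by ring
      rw [e1, e2, e3] at harr
      rw [harr]
      have hlen : ((List.map (fun g => max (g / n) (g % n) + 1)
          (PySem.List.pyRange (L*n) ((R+1)*n) 1)).length : Int) = (R+1)*n - L*n := by
        simp only [List.length_map, PySem.List.length_pyRange_one]
        have : L*n ≤ (R+1)*n := by nlinarith
        omega
      rw [hlen]
      have hPQ : L*n ≤ R*n := by nlinarith
      have hleft : left = L*n + a := by rw [← hLa]; ring
      have hright : right = R*n + b := by rw [← hRb]; ring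
      have e4 : (R+1)*n = R*n + n := by ring
      have hstop0 : (0:Int) ≤ (R+1)*n - L*n - (n - b) + 1 := by rw [e4]; omega
      rw [PySem.List.slice_toNat _ ha0 hstop0]
      have hdropc : L*n + (a.toNat : Int) ≤ (R+1)*n := by
        rw [Int.toNat_of_nonneg ha0, e4]; omega
      rw [pv_drop_map_pyRange _ _ _ _ hdropc, Int.toNat_of_nonneg ha0, ← hleft]
      have hq : ((((R+1)*n - L*n - (n - b) + 1).toNat - a.toNat : Nat) : Int) = right + 1 - left := by
        rw [e4] at *; omega
      have htakec : left + ((((R+1)*n - L*n - (n - b) + 1).toNat - a.toNat : Nat) : Int) ≤ (R+1)*n := by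
        rw [hq, e4]; omega
      rw [pv_take_map_pyRange _ _ _ _ htakec, hq]
      have e5 : left + (right + 1 - left) = right + 1 := by ring
      rw [e5]
    · -- right < left inside one row: the slice start is past its stop, both sides empty
      rw [not_le] at hlr
      rw [PySem.List.pyRange_one_eq_nil (by omega : right + 1 ≤ left), List.map_nil]
      have heq : L = R := le_antisymm (by omega) (Int.ediv_le_ediv hn0 (by omega))
      rw [← heq] at hRb
      have hba : b < a := by omega
      have harr := pv_rows_concat n hn0 1 (L+1) (by omega) (by push_cast; omega)
      have e1 : L + 1 + ((1:Nat):Int) = R + 2 := by push_cast; omega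
      have e2 : (L + 1 - 1) * n = L * n := by ring
      have e3 : (L + 1 - 1 + ((1:Nat):Int)) * n = L*n + n := by push_cast; ring
      rw [e1, e2, e3] at harr
      rw [harr]
      have hlen : ((List.map (fun g => max (g / n) (g % n) + 1)
          (PySem.List.pyRange (L*n) (L*n + n) 1)).length : Int) = n := by
        simp only [List.length_map, PySem.List.length_pyRange_one]
        omega
      rw [hlen]
      have hstop0 : (0:Int) ≤ n - (n - b) + 1 := by omega
      rw [PySem.List.slice_toNat _ ha0 hstop0]
      have hz : (n - (n - b) + 1).toNat - a.toNat = 0 := by omega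
      rw [hz, List.take_zero]
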